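-- pv_equiv track=rewrite | github.com/ergonomica/ergonomica | ergonomica/lib/lang/tokenizer.py | escape_parens
-- ===== SOURCE A (Python) =====
-- def escape_parens(string):
--     string_delim = False  # the wrapping quote
--     escaped_string = [""]   # will be joined after completion
--     for i in string:
--         if i in ["(", ")"]:
--             if not string_delim:
--                 escaped_string[-1] += "\x00" + i
--                 continue
--             else:
--                 escaped_string[-1] += i
--         elif i in ["\"", "'"]:
--             escaped_string[-1] += i
--             if string_delim:
--                 if string_delim == i:
--                     string_delim = False
--                     continue
--             else:
--                 string_delim = i
--                 continue
--         else:
--             if (len(escaped_string) > 0):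
--                 if (i == " ") and not string_delim:
--                     escaped_string.append("")
--                     pass
--                 else:
--                     escaped_string[-1] += i
--             else:
--                 escaped_string.append(i)
--
--     return " ".join(escaped_string)
-- ===== SOURCE B (Python) =====
-- def escape_parens(string):
--     # Build one output string directly: splitting on unquoted spaces and
--     # re-joining with ' ' is the identity, so no token list is needed.
--     string_delim = False
--     out = ""
--     for ch in string:
--         if ch in "()":
--             out += ch if string_delim else "\x00" + ch
--         elif ch in "\"'":
--             out += ch
--             if string_delim:
--                 if string_delim == ch:
--                     string_delim = False
--             else:
--                 string_delim = ch
--         else: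
--             out += ch
--     return out
-- ===== Notes on version B (the rewrite author's own statement) =====
-- stated objective: simpler
-- what changed: B accumulates one output string in a single pass instead of maintaining a token list split on unquoted spaces and re-joining it (the split/join round-trip is the identity), dropping the dead len>0 guard; A's per-character `escaped_string[-1] += c` copies the growing last token each time, so A is quadratic in token length while B's string append is amortized linear.
import Mathlib
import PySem

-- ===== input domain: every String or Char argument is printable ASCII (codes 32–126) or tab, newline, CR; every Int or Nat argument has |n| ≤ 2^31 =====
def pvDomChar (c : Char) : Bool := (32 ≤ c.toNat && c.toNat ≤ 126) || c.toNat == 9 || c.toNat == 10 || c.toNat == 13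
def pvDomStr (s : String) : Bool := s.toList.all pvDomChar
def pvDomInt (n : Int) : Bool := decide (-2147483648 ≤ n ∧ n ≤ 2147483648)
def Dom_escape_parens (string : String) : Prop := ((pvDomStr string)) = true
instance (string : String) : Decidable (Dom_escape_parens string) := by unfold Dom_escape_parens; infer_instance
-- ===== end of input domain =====

-- B builds one output string directly (the split-on-unquoted-space / ' '.join round-trip of A is the identity); objective: simpler.

-- ===== PORT A =====
-- escaped_string[-1] += s  (escaped_string is never empty: it starts as [""] and only grows)
def pvAppendLast : List String → String → List String
  | [], s => [s]
  | [x], s => [x ++ s]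
  | x :: xs, s => x :: pvAppendLast xs s

-- one iteration of A's for-loop; state = (string_delim, escaped_string)
def pvStepA (st : Option Char × List String) (i : Char) : Option Char × List String :=
  let (delim, es) := st
  if i = '(' ∨ i = ')' then
    if delim = none then (delim, pvAppendLast es (String.ofList ['\x00', i]))
    else (delim, pvAppendLast es (String.ofList [i]))
  else if i = '"' ∨ i = '\'' then
    let es' := pvAppendLast es (String.ofList [i])
    match delim with
    | some d => if d = i then (none, es') else (some d, es')
    | none => (some i, es')
  else
    if es.length > 0 then
      if i = ' ' ∧ delim = none then (delim, es ++ [""])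
      else (delim, pvAppendLast es (String.ofList [i]))
    else (delim, es ++ [String.ofList [i]])

-- " ".join
def pvJoinSp : List String → String
  | [] => ""
  | [x] => x
  | x :: xs => x ++ " " ++ pvJoinSp xs

def escape_parens (string : String) : String :=
  pvJoinSp (string.toList.foldl pvStepA (none, [""])).2

-- ===== PORT B =====
-- one iteration of B's for-loop; state = (string_delim, out)
def pvStepB (st : Option Char × String) (i : Char) : Option Char × String :=
  let (delim, out) := st
  if i = '(' ∨ i = ')' then
    if delim = none then (delim, out ++ String.ofList ['\x00', i])
    else (delim, out ++ String.ofList [i])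
  else if i = '"' ∨ i = '\'' then
    let out' := out ++ String.ofList [i]
    match delim with
    | some d => if d = i then (none, out') else (some d, out')
    | none => (some i, out')
  else (delim, out ++ String.ofList [i])

def escape_parens_alt (string : String) : String :=
  (string.toList.foldl pvStepB (none, "")).2

-- ===== PRECONDITION & SPEC =====
def Spec_escape_parens (string : String) (out : String) : Prop := out = escape_parens_alt string
instance (string : String) (out : String) : Decidable (Spec_escape_parens string out) := by unfold Spec_escape_parens; infer_instance

-- ===== CLAIM (what is proved, stated in full; the proofs are below) =====
def Claim_equal_escape_parens : Prop := ∀ (string : String), Dom_escape_parens string → Spec_escape_parens string (escape_parens string)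

-- ===== LEMMAS AND PROOFS =====

theorem pvAppendLast_ne_nil (es : List String) (s : String) : pvAppendLast es s ≠ [] := by
  cases es with
  | nil => simp [pvAppendLast]
  | cons x xs => cases xs <;> simp [pvAppendLast]

theorem pvJoinSp_appendLast (es : List String) (s : String) (h : es ≠ []) :
    pvJoinSp (pvAppendLast es s) = pvJoinSp es ++ s := by
  induction es with
  | nil => exact absurd rfl h
  | cons x xs ih =>
    cases xs with
    | nil => simp [pvAppendLast, pvJoinSp]
    | cons y ys =>
      have := ih (by simp)
      simp only [pvAppendLast, pvJoinSp]
      cases hys : pvAppendLast (y :: ys) s with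
      | nil => exact absurd hys (pvAppendLast_ne_nil _ _)
      | cons z zs =>
        rw [hys] at this
        simp only [pvJoinSp] at this ⊢
        cases zs with
        | nil =>
          cases ys with
          | nil =>
            simp [pvJoinSp] at this ⊢
            rw [this]; simp [String.append_assoc]
          | cons w ws =>
            exfalso
            simp [pvAppendLast] at hys
            have := pvAppendLast_ne_nil (w :: ws) s
            cases h' : pvAppendLast (w :: ws) s with
            | nil => exact this h'
            | cons a as => rw [h'] at hys; simp at hys
        | cons u us =>
          simp [pvJoinSp] at this ⊢
          rw [this]
          simp [String.append_assoc]

theorem pvJoinSp_append_empty (es : List String) (h : es ≠ []) :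
    pvJoinSp (es ++ [""]) = pvJoinSp es ++ " " := by
  induction es with
  | nil => exact absurd rfl h
  | cons x xs ih =>
    cases xs with
    | nil => simp [pvJoinSp]
    | cons y ys =>
      have := ih (by simp)
      simp only [List.cons_append, pvJoinSp] at this ⊢
      rw [this]; simp [String.append_assoc]

-- the loop invariant: A's (delim, token list) and B's (delim, out) stay in step
theorem pv_inv (l : List Char) :
    ∀ (d : Option Char) (es : List String) (out : String), es ≠ [] → pvJoinSp es = out →
      (l.foldl pvStepA (d, es)).1 = (l.foldl pvStepB (d, out)).1 ∧
      (l.foldl pvStepA (d, es)).2 ≠ [] ∧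
      pvJoinSp (l.foldl pvStepA (d, es)).2 = (l.foldl pvStepB (d, out)).2 := by
  induction l with
  | nil => intro d es out hne hj; exact ⟨rfl, hne, hj⟩
  | cons i rest ih =>
    intro d es out hne hj
    simp only [List.foldl_cons]
    have hlen : es.length > 0 := by
      cases es with
      | nil => exact absurd rfl hne
      | cons a as => simp
    by_cases hp : i = '(' ∨ i = ')'
    · by_cases hd : d = none
      · simp only [pvStepA, pvStepB, if_pos hp, hd]
        exact ih none _ _ (pvAppendLast_ne_nil _ _)
          (by rw [pvJoinSp_appendLast _ _ hne, hj])
      · simp only [pvStepA, pvStepB, if_pos hp, if_neg hd]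
        exact ih d _ _ (pvAppendLast_ne_nil _ _)
          (by rw [pvJoinSp_appendLast _ _ hne, hj])
    · by_cases hq : i = '"' ∨ i = '\''
      · cases d with
        | none =>
          simp only [pvStepA, pvStepB, if_neg hp, if_pos hq]
          exact ih (some i) _ _ (pvAppendLast_ne_nil _ _)
            (by rw [pvJoinSp_appendLast _ _ hne, hj])
        | some c =>
          by_cases hc : c = i
          · simp only [pvStepA, pvStepB, if_neg hp, if_pos hq, if_pos hc]
            exact ih none _ _ (pvAppendLast_ne_nil _ _)
              (by rw [pvJoinSp_appendLast _ _ hne, hj])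
          · simp only [pvStepA, pvStepB, if_neg hp, if_pos hq, if_neg hc]
            exact ih (some c) _ _ (pvAppendLast_ne_nil _ _)
              (by rw [pvJoinSp_appendLast _ _ hne, hj])
      · by_cases hs : i = ' ' ∧ d = none
        · simp only [pvStepA, pvStepB, if_neg hp, if_neg hq, if_pos hlen, if_pos hs]
          refine ih d _ _ (by simp) ?_
          rw [pvJoinSp_append_empty _ hne, hj, hs.1]
        · simp only [pvStepA, pvStepB, if_neg hp, if_neg hq, if_pos hlen, if_neg hs]
          exact ih d _ _ (pvAppendLast_ne_nil _ _)
            (by rw [pvJoinSp_appendLast _ _ hne, hj])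

-- ===== VERDICT (by name: the statement is the Claim_ definition above) =====
theorem escape_parens_spec : Claim_equal_escape_parens := by
  intro s _
  unfold Spec_escape_parens escape_parens escape_parens_alt
  exact (pv_inv s.toList none [""] "" (by simp) rfl).2.2
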